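-- pv_equiv track=rewrite | github.com/tarun261003/PythonPractice | codes/30q.py | happy_checker
-- ===== SOURCE A (Python) =====
-- def happy_checker(inp1):
--     vowels=list('aeiou')
--     count=0
--     subs=[inp1[i:j] for i in range(len(inp1)) for j in range(i+1,len(inp1))]
--     subs.sort(key=len)
--     substrings=[i for i in subs if len(i)>2]
--     for str1 in substrings:
--         count=0
--         for i in str1:
--             if i in vowels:
--                 count+=1
--         if len(str1)==count:
--             return True
--     return False
-- ===== SOURCE B (Python) =====
-- def happy_checker(inp1):
--     run = 0
--     for ch in inp1:
--         run = run + 1 if ch in 'aeiou' else 0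
--         if run == 3:
--             return True
--     return False
-- ===== Notes on version B (the rewrite author's own statement) =====
-- stated objective: faster
-- what changed: Replaced A's generate-all-substrings + sort-by-length + per-substring vowel-count pipeline with a single linear pass that tracks the length of the current run of consecutive vowels.
-- intended difference: On strings whose only run of three consecutive vowels includes the final character, A returns False because its substring generation uses range(i+1, len(inp1)) with an exclusive upper bound and so never produces a substring containing the last character, while B returns True, the intended answer since such a string does contain three consecutive vowels. — e.g. on happy_checker("eee"): A returns false, B returns true
import Mathlib
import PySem

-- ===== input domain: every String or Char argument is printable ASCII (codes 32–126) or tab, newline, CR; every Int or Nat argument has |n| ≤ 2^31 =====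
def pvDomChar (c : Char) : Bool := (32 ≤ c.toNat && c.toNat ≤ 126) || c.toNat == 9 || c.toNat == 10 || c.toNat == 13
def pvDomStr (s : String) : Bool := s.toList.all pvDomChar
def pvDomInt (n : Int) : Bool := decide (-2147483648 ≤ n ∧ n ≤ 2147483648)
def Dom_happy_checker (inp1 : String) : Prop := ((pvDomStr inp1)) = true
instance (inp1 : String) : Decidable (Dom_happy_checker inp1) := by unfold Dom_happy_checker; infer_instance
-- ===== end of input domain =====

-- B replaces A's generate-all-substrings / sort / count-vowels pipeline with a single linear
-- pass tracking the current run of consecutive vowels (objective: faster); B differs from A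
-- exactly on the D_ corner described below, where A misses a vowel run touching the last char.

-- ===== PORT A =====
-- the 'for str1 in substrings' loop with its early 'return True'
def happy_checker_loop (vowels : List Char) : List (List Char) → Bool
  | [] => false
  | str1 :: rest =>
    let count : Int := str1.foldl (fun c i => if vowels.contains i then c + 1 else c) 0
    if (str1.length : Int) = count then true else happy_checker_loop vowels rest

def happy_checker (inp1 : String) : Bool :=
  let vowels : List Char := "aeiou".toList
  let l := inp1.toList
  let n : Int := l.length
  let subs := (PySem.List.pyRange 0 n 1).flatMap (fun i =>
    (PySem.List.pyRange (i + 1) n 1).map (fun j => PySem.List.slice l (some i) (some j)))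
  let subsSorted := PySem.List.sorted subs (fun s => s.length) false
  let substrings := subsSorted.filter (fun s => decide (2 < s.length))
  happy_checker_loop vowels substrings

-- ===== PORT B =====
-- the 'for ch in inp1' loop carrying the run counter, with its early 'return True'
def happy_checker_alt_loop : List Char → Nat → Bool
  | [], _ => false
  | ch :: rest, run =>
    let run' := if ("aeiou".toList).contains ch then run + 1 else 0
    if run' = 3 then true else happy_checker_alt_loop rest run'

def happy_checker_alt (inp1 : String) : Bool :=
  happy_checker_alt_loop inp1.toList 0

-- ===== PRECONDITION & SPEC =====

-- A returns False whenever the only run of three consecutive vowels includes the final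
-- character (its substrings never contain the last character); B returns True there, the
-- intended answer, since such a string does contain three consecutive vowels.
def D_happy_checker (inp1 : String) : Prop :=
  (∃ k < inp1.toList.length, k + 2 < inp1.toList.length ∧
     (inp1.toList.getD k ' ') ∈ ['a','e','i','o','u'] ∧
     (inp1.toList.getD (k + 1) ' ') ∈ ['a','e','i','o','u'] ∧
     (inp1.toList.getD (k + 2) ' ') ∈ ['a','e','i','o','u']) ∧
  ¬ (∃ k < inp1.toList.dropLast.length, k + 2 < inp1.toList.dropLast.length ∧
     (inp1.toList.dropLast.getD k ' ') ∈ ['a','e','i','o','u'] ∧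
     (inp1.toList.dropLast.getD (k + 1) ' ') ∈ ['a','e','i','o','u'] ∧
     (inp1.toList.dropLast.getD (k + 2) ' ') ∈ ['a','e','i','o','u'])
instance (inp1 : String) : Decidable (D_happy_checker inp1) := by unfold D_happy_checker; infer_instance

def Spec_happy_checker (inp1 : String) (out : Bool) : Prop := ¬ D_happy_checker inp1 → out = happy_checker_alt inp1
instance (inp1 : String) (out : Bool) : Decidable (Spec_happy_checker inp1 out) := by unfold Spec_happy_checker; infer_instance

def pvDiffWitness_happy_checker : String := "eee"
def pvDiffWitnessOut_happy_checker : Bool × Bool := (false, true)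

-- ===== CLAIM (what is proved, stated in full; the proofs are below) =====
def Claim_unchanged_happy_checker : Prop := ∀ (inp1 : String), Dom_happy_checker inp1 → Spec_happy_checker inp1 (happy_checker inp1)
def Claim_changed_happy_checker : Prop := Dom_happy_checker (pvDiffWitness_happy_checker) ∧ D_happy_checker (pvDiffWitness_happy_checker) ∧ happy_checker (pvDiffWitness_happy_checker) = pvDiffWitnessOut_happy_checker.1 ∧ happy_checker_alt (pvDiffWitness_happy_checker) = pvDiffWitnessOut_happy_checker.2 ∧ pvDiffWitnessOut_happy_checker.1 ≠ pvDiffWitnessOut_happy_checker.2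
def Claim_exact_happy_checker : Prop := ∀ (inp1 : String), Dom_happy_checker inp1 → D_happy_checker inp1 → happy_checker inp1 ≠ happy_checker_alt inp1

-- ===== LEMMAS AND PROOFS =====

def pvIsV (c : Char) : Bool := ("aeiou".toList).contains c

-- does the boolean list contain three consecutive 'true's?
def pvRun3 : List Bool → Bool
  | a :: b :: c :: rest => (a && b && c) || pvRun3 (b :: c :: rest)
  | _ => false

theorem pv_vowel_iff (c : Char) : (c ∈ ['a','e','i','o','u']) ↔ pvIsV c = true := by
  simp [pvIsV, show "aeiou".toList = ['a','e','i','o','u'] from rfl]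

theorem pv_loop_eq_any (v : List Char) (L : List (List Char)) :
    happy_checker_loop v L =
      L.any (fun x => decide ((x.length : Int) =
        x.foldl (fun c i => if v.contains i then c + 1 else c) 0)) := by
  induction L with
  | nil => rfl
  | cons x rest ih =>
    simp only [happy_checker_loop, List.any_cons, ih]
    split_ifs with h
    · rw [decide_eq_true h, Bool.true_or]
    · rw [decide_eq_false h, Bool.false_or]

theorem pv_pred_eq_all (v : List Char) (x : List Char) :
    (decide ((x.length : Int) =
        x.foldl (fun c i => if v.contains i then c + 1 else c) 0)) = x.all (fun c => v.contains c) := by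
  rw [PySem.List.foldl_if_add_one (fun i => v.contains i) x 0, zero_add]
  rw [Bool.eq_iff_iff, decide_eq_true_eq, List.all_eq_true]
  rw [show ((x.length : Int) = (x.countP (fun i => v.contains i) : Int)) ↔
      x.countP (fun i => v.contains i) = x.length by omega]
  exact List.countP_eq_length

-- A returns true iff some slice inp1[i:j] (0 ≤ i < n, i+1 ≤ j < n) has length > 2 and is all vowels
theorem pv_A_iff (inp1 : String) :
    happy_checker inp1 = true ↔
      ∃ i j : Int, 0 ≤ i ∧ i < (inp1.toList.length : Int) ∧ i + 1 ≤ j ∧ j < (inp1.toList.length : Int) ∧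
        2 < (PySem.List.slice inp1.toList (some i) (some j)).length ∧
        ∀ c ∈ PySem.List.slice inp1.toList (some i) (some j), pvIsV c = true := by
  unfold happy_checker
  simp only [pv_loop_eq_any, List.any_filter, pv_pred_eq_all, List.any_eq_true,
    PySem.List.mem_sorted, List.mem_flatMap, List.mem_map, PySem.List.mem_pyRange_one,
    Bool.and_eq_true, decide_eq_true_eq, List.all_eq_true]
  constructor
  · rintro ⟨x, ⟨i, ⟨hi0, hin⟩, j, ⟨hj1, hjn⟩, rfl⟩, hlen, hall⟩
    exact ⟨i, j, hi0, hin, hj1, hjn, hlen, hall⟩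
  · rintro ⟨i, j, hi0, hin, hj1, hjn, hlen, hall⟩
    exact ⟨PySem.List.slice inp1.toList (some i) (some j),
      ⟨i, ⟨hi0, hin⟩, j, ⟨hj1, hjn⟩, rfl⟩, hlen, hall⟩

-- pvRun3 ignores a leading false (and one element before it)
theorem pv_run3_false_cons (ys : List Bool) : pvRun3 (false :: ys) = pvRun3 ys := by
  rcases ys with _ | ⟨y1, _ | ⟨y2, ys⟩⟩ <;> simp [pvRun3]

theorem pv_run3_cons_false (b : Bool) (ys : List Bool) :
    pvRun3 (b :: false :: ys) = pvRun3 ys := by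
  rcases ys with _ | ⟨y1, ys⟩ <;> simp [pvRun3, pv_run3_false_cons]

-- B's loop with pending run r (r ≤ 2) searches for three consecutive trues, r of them pending
theorem pv_loopB_eq (l : List Char) (r : Nat) (hr : r ≤ 2) :
    happy_checker_alt_loop l r = pvRun3 (List.replicate r true ++ l.map pvIsV) := by
  induction l generalizing r with
  | nil =>
    interval_cases r <;> rfl
  | cons c rest ih =>
    simp only [happy_checker_alt_loop]
    by_cases hv : ("aeiou".toList).contains c = true
    · rw [if_pos hv]
      have hmap : (c :: rest).map pvIsV = true :: rest.map pvIsV := by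
        simp only [List.map_cons]
        rw [show pvIsV c = true from hv]
      rw [hmap]
      by_cases hr2 : r = 2
      · subst hr2
        rw [if_pos rfl]
        simp [List.replicate, pvRun3]
      · rw [if_neg (by omega), ih (r + 1) (by omega)]
        rw [show List.replicate r true ++ true :: rest.map pvIsV
              = List.replicate (r + 1) true ++ rest.map pvIsV by
            rw [List.replicate_succ']; simp]
    · rw [if_neg hv]
      have hvf : pvIsV c = false := by
        unfold pvIsV; exact Bool.eq_false_iff.mpr (fun h => hv h)
      have hmap : (c :: rest).map pvIsV = false :: rest.map pvIsV := by
        simp only [List.map_cons, hvf]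
      rw [hmap, if_neg (by omega), ih 0 (by omega),
        show List.replicate 0 true ++ rest.map pvIsV = rest.map pvIsV from rfl]
      interval_cases r
      · rw [show List.replicate 0 true ++ false :: rest.map pvIsV
              = false :: rest.map pvIsV from rfl, pv_run3_false_cons]
      · rw [show List.replicate 1 true ++ false :: rest.map pvIsV
              = true :: false :: rest.map pvIsV from rfl, pv_run3_cons_false]
      · rw [show List.replicate 2 true ++ false :: rest.map pvIsV
              = true :: true :: false :: rest.map pvIsV from rfl,
          show pvRun3 (true :: true :: false :: rest.map pvIsV)
              = (true && true && false || pvRun3 (true :: false :: rest.map pvIsV)) from rfl,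
          pv_run3_cons_false]
        simp

theorem pv_B_eq_run3 (inp1 : String) :
    happy_checker_alt inp1 = pvRun3 (inp1.toList.map pvIsV) := by
  unfold happy_checker_alt
  simpa using pv_loopB_eq inp1.toList 0 (by omega)

-- getD on dropLast at an in-range index is getElem on the full list
theorem pv_getD_dropLast (l : List Char) (k : Nat) (h : k < l.dropLast.length) :
    l.dropLast.getD k ' ' = l[k]'(by rw [List.length_dropLast] at h; omega) := by
  rw [List.getD_eq_getElem _ _ h]
  simp [List.getElem_dropLast]

-- pvRun3 on a mapped list ↔ a window of three vowels at some index
theorem pv_run3_iff (m : List Char) :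
    pvRun3 (m.map pvIsV) = true ↔
      ∃ k : Nat, k + 2 < m.length ∧
        pvIsV (m.getD k ' ') = true ∧
        pvIsV (m.getD (k + 1) ' ') = true ∧
        pvIsV (m.getD (k + 2) ' ') = true := by
  induction m with
  | nil =>
    constructor
    · intro h; exact absurd h (by simp [pvRun3])
    · rintro ⟨k, hk, -⟩; simp at hk
  | cons a tl ih =>
    rcases tl with _ | ⟨b, _ | ⟨c, r⟩⟩
    · constructor
      · intro h; exact absurd h (by simp [pvRun3])
      · rintro ⟨k, hk, -⟩; simp at hk
    · constructor
      · intro h; exact absurd h (by simp [pvRun3])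
      · rintro ⟨k, hk, -⟩; simp at hk
    · have hstep : pvRun3 ((a :: b :: c :: r).map pvIsV)
          = ((pvIsV a && pvIsV b && pvIsV c) || pvRun3 ((b :: c :: r).map pvIsV)) := rfl
      rw [hstep]
      constructor
      · intro h
        rcases Bool.or_eq_true_iff.mp h with h3 | hrest
        · obtain ⟨⟨ha, hb⟩, hc⟩ : (pvIsV a = true ∧ pvIsV b = true) ∧ pvIsV c = true := by
            simpa using h3
          refine ⟨0, by simp, ?_, ?_, ?_⟩
          · simpa using ha
          · simpa using hb
          · simpa using hc
        · obtain ⟨k, hk, h0, h1, h2⟩ := ih.mp hrest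
          refine ⟨k + 1, by simp only [List.length_cons] at hk ⊢; omega, ?_, ?_, ?_⟩
          · rw [List.getD_cons_succ]; exact h0
          · rw [show k + 1 + 1 = (k + 1) + 1 from rfl, List.getD_cons_succ]; exact h1
          · rw [show k + 1 + 2 = (k + 2) + 1 from rfl, List.getD_cons_succ]; exact h2
      · rintro ⟨k, hk, h0, h1, h2⟩
        rcases k with _ | k
        · apply Bool.or_eq_true_iff.mpr; left
          simp only [List.getD_cons_zero] at h0
          have hb : pvIsV b = true := by simpa using h1
          have hc : pvIsV c = true := by simpa using h2
          simp [h0, hb, hc]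
        · apply Bool.or_eq_true_iff.mpr; right
          apply ih.mpr
          refine ⟨k, by simp only [List.length_cons] at hk ⊢; omega, ?_, ?_, ?_⟩
          · rw [List.getD_cons_succ] at h0; exact h0
          · rw [show k + 1 + 1 = (k + 1) + 1 from rfl, List.getD_cons_succ] at h1; exact h1
          · rw [show k + 1 + 2 = (k + 2) + 1 from rfl, List.getD_cons_succ] at h2; exact h2

-- the (a+r)-th element of l lies in the slice l[a:b] when a+r < b ≤ len
theorem pv_slice_mem (l : List Char) (a b r : Nat) (hr : r < b - a) (hb : b ≤ l.length) :
    ∃ h : a + r < l.length, l[a + r] ∈ (l.drop a).take (b - a) := by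
  have h1 : a + r < l.length := by omega
  refine ⟨h1, ?_⟩
  have h2 : r < ((l.drop a).take (b - a)).length := by
    simp [List.length_take, List.length_drop]; omega
  have h3 : ((l.drop a).take (b - a))[r] = l[a + r] := by
    rw [List.getElem_take, List.getElem_drop]
  rw [← h3]
  exact List.getElem_mem h2

-- A computes 'three consecutive vowels somewhere in inp1 with the last character dropped'
theorem pv_A_eq_run3 (inp1 : String) :
    happy_checker inp1 = pvRun3 (inp1.toList.dropLast.map pvIsV) := by
  rw [Bool.eq_iff_iff, pv_A_iff, pv_run3_iff]
  set l := inp1.toList with hl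
  have hdl : l.dropLast.length = l.length - 1 := List.length_dropLast
  constructor
  · rintro ⟨i, j, hi0, hin, hj1, hjn, hlen, hall⟩
    rw [PySem.List.slice_toNat l hi0 (by omega)] at hlen hall
    have hS : 2 < min (j.toNat - i.toNat) (l.length - i.toNat) := by
      simpa [List.length_take, List.length_drop] using hlen
    refine ⟨i.toNat, by omega, ?_, ?_, ?_⟩
    · rw [pv_getD_dropLast l i.toNat (by omega)]
      obtain ⟨h, hmem⟩ := pv_slice_mem l i.toNat j.toNat 0 (by omega) (by omega)
      simpa using hall _ (by simpa using hmem)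
    · rw [pv_getD_dropLast l (i.toNat + 1) (by omega)]
      obtain ⟨h, hmem⟩ := pv_slice_mem l i.toNat j.toNat 1 (by omega) (by omega)
      exact hall _ hmem
    · rw [pv_getD_dropLast l (i.toNat + 2) (by omega)]
      obtain ⟨h, hmem⟩ := pv_slice_mem l i.toNat j.toNat 2 (by omega) (by omega)
      exact hall _ hmem
  · rintro ⟨k, hk2, ha, hb, hc⟩
    rw [pv_getD_dropLast l k (by omega)] at ha
    rw [pv_getD_dropLast l (k + 1) (by omega)] at hb
    rw [pv_getD_dropLast l (k + 2) (by omega)] at hc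
    refine ⟨(k : Int), (k : Int) + 3, by omega, by omega, by omega, by omega, ?_, ?_⟩
    · rw [PySem.List.slice_toNat l (by omega) (by omega)]
      simp only [List.length_take, List.length_drop]
      omega
    · intro x hxmem
      rw [PySem.List.slice_toNat l (by omega) (by omega)] at hxmem
      rw [List.mem_iff_getElem] at hxmem
      obtain ⟨t, ht, rfl⟩ := hxmem
      have ht3 : t < 3 := by
        simp only [List.length_take, List.length_drop] at ht
        omega
      have h3 : ((l.drop (k : Int).toNat).take (((k : Int) + 3).toNat - (k : Int).toNat))[t]'ht
          = l[(k : Int).toNat + t]'(by omega) := by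
        rw [List.getElem_take, List.getElem_drop]
      rw [h3]
      have hkt : (k : Int).toNat = k := by omega
      interval_cases t
      · simpa [hkt] using ha
      · simpa [hkt] using hb
      · simpa [hkt] using hc

-- a vowel window in dropLast is a vowel window in the full list
theorem pv_run3_dropLast_mono (l : List Char) (h : pvRun3 (l.dropLast.map pvIsV) = true) :
    pvRun3 (l.map pvIsV) = true := by
  rw [pv_run3_iff] at h ⊢
  obtain ⟨k, hk, h0, h1, h2⟩ := h
  have hdl : l.dropLast.length = l.length - 1 := List.length_dropLast
  refine ⟨k, by omega, ?_, ?_, ?_⟩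
  · rw [pv_getD_dropLast l k (by omega)] at h0
    rw [List.getD_eq_getElem _ _ (by omega : k < l.length)]
    exact h0
  · rw [pv_getD_dropLast l (k + 1) (by omega)] at h1
    rw [List.getD_eq_getElem _ _ (by omega : k + 1 < l.length)]
    exact h1
  · rw [pv_getD_dropLast l (k + 2) (by omega)] at h2
    rw [List.getD_eq_getElem _ _ (by omega : k + 2 < l.length)]
    exact h2

theorem pv_exists_win_iff (m : List Char) :
    (∃ k < m.length, k + 2 < m.length ∧
       (m.getD k ' ') ∈ ['a','e','i','o','u'] ∧
       (m.getD (k + 1) ' ') ∈ ['a','e','i','o','u'] ∧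
       (m.getD (k + 2) ' ') ∈ ['a','e','i','o','u']) ↔
    pvRun3 (m.map pvIsV) = true := by
  rw [pv_run3_iff]
  constructor
  · rintro ⟨k, -, h2, ha, hb, hc⟩
    exact ⟨k, h2, (pv_vowel_iff _).mp ha, (pv_vowel_iff _).mp hb, (pv_vowel_iff _).mp hc⟩
  · rintro ⟨k, hk, ha, hb, hc⟩
    exact ⟨k, by omega, hk, (pv_vowel_iff _).mpr ha, (pv_vowel_iff _).mpr hb,
      (pv_vowel_iff _).mpr hc⟩

theorem pv_D_iff (inp1 : String) :
    D_happy_checker inp1 ↔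
      (pvRun3 (inp1.toList.map pvIsV) = true ∧
       pvRun3 (inp1.toList.dropLast.map pvIsV) = false) := by
  unfold D_happy_checker
  rw [pv_exists_win_iff inp1.toList, pv_exists_win_iff inp1.toList.dropLast]
  constructor
  · rintro ⟨h1, h2⟩
    exact ⟨h1, by revert h2; cases pvRun3 (inp1.toList.dropLast.map pvIsV) <;> simp⟩
  · rintro ⟨h1, h2⟩
    exact ⟨h1, by rw [h2]; simp⟩

-- ===== VERDICT (by name: the statement is the Claim_ definition above) =====
theorem happy_checker_spec : Claim_unchanged_happy_checker := by
  intro inp1 _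
  unfold Spec_happy_checker
  intro hnd
  rw [pv_D_iff] at hnd
  rw [pv_A_eq_run3, pv_B_eq_run3]
  cases hdl : pvRun3 (inp1.toList.dropLast.map pvIsV) with
  | true => exact (pv_run3_dropLast_mono _ hdl).symm
  | false =>
    cases hfull : pvRun3 (inp1.toList.map pvIsV) with
    | false => rfl
    | true => exact absurd ⟨hfull, hdl⟩ hnd

theorem happy_checker_changed : Claim_changed_happy_checker := by
  unfold Claim_changed_happy_checker; decide

theorem happy_checker_tight : Claim_exact_happy_checker := by
  intro inp1 _ hd
  rw [pv_D_iff] at hd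
  rw [pv_A_eq_run3, pv_B_eq_run3, hd.1, hd.2]
  decide
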